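-- pv_equiv track=rewrite | github.com/jamesreynolds184-svg/Memorial-App | Scrips/add_what3words.py | get_what3words_code
-- ===== SOURCE A (Python) =====
-- def get_what3words_code(panel_number):
--     """
--     Get the what3words code for a panel number based on defined ranges.
--
--     Args:
--         panel_number: The panel number
--
--     Returns:
--         what3words code string or None if not defined
--     """
--     if panel_number is None:
--         return None
--
--     panel = int(panel_number)
--
--     # Define the what3words mapping for each panel range
--     w3w_ranges = [
--         (1, 5, "///woke.fastening.rinses"),
--         (6, 10, "///timeless.craziest.tasteful"),
--         (11, 15, "///doll.caravans.begun"),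
--         (16, 20, "///vandalism.angle.copiers"),
--         (21, 25, "///ripe.decorated.risk"),
--         (26, 30, "///quaking.public.ranted"),
--         (31, 35, "///wrenching.directors.aliens"),
--         (36, 40, "///icon.scrubbing.survey"),
--         (41, 45, "///coil.initial.gourmet"),
--         (46, 49, "///outer.simulator.harder"),
--         (50, 53, "///salaried.waddled.clashes"),
--         (54, 57, "///condiment.irrigate.exhales"),
--         (58, 61, "///marathons.crispier.crystal"),
--         (62, 65, "///talkative.term.universes"),
--         (66, 69, "///feasted.residual.stitch"),
--         (70, 73, "///rosier.landscape.minds"),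
--         (74, 77, "///upgrading.revolting.belong"),
--     ]
--
--     # Find the matching range
--     for start, end, code in w3w_ranges:
--         if start <= panel <= end:
--             return code
--
--     return None  # Panel outside defined ranges
-- ===== SOURCE B (Python) =====
-- _W3W_CODES = [
--     "///woke.fastening.rinses",
--     "///timeless.craziest.tasteful",
--     "///doll.caravans.begun",
--     "///vandalism.angle.copiers",
--     "///ripe.decorated.risk",
--     "///quaking.public.ranted",
--     "///wrenching.directors.aliens",
--     "///icon.scrubbing.survey",
--     "///coil.initial.gourmet",
--     "///outer.simulator.harder",
--     "///salaried.waddled.clashes",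
--     "///condiment.irrigate.exhales",
--     "///marathons.crispier.crystal",
--     "///talkative.term.universes",
--     "///feasted.residual.stitch",
--     "///rosier.landscape.minds",
--     "///upgrading.revolting.belong",
-- ]
--
-- def get_what3words_code(panel_number):
--     if panel_number is None:
--         return None
--     panel = int(panel_number)
--     # panels 1..45 fall in nine 5-wide blocks, panels 46..77 in eight 4-wide blocks
--     if 1 <= panel <= 45:
--         return _W3W_CODES[(panel - 1) // 5]
--     if 46 <= panel <= 77:
--         return _W3W_CODES[9 + (panel - 46) // 4]
--     return None
-- ===== Notes on version B (the rewrite author's own statement) =====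
-- stated objective: alternative
-- what changed: Replaces the linear scan over 17 (start,end,code) interval tuples with a closed-form index computation: the ranges are nine 5-wide blocks (1-45) then eight 4-wide blocks (46-77), so the code is looked up at (panel-1)//5 or 9+(panel-46)//4 in a flat code list.
import Mathlib
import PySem

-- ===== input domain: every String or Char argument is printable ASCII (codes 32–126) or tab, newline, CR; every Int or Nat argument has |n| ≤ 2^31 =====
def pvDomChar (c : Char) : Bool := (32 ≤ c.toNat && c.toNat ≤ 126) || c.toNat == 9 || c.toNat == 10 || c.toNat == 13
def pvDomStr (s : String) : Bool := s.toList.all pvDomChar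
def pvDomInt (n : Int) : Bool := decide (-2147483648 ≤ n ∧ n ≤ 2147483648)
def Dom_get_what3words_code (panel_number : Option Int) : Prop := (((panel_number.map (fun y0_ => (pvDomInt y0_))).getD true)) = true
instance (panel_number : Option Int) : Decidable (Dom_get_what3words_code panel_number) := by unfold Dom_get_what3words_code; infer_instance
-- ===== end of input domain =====

-- B replaces A's linear scan over interval tuples by a closed-form block-index lookup (alternative; same observable behaviour).

-- ===== PORT A =====
def pvW3wRanges : List (Int × Int × String) :=
  [ (1, 5, "///woke.fastening.rinses"),
    (6, 10, "///timeless.craziest.tasteful"),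
    (11, 15, "///doll.caravans.begun"),
    (16, 20, "///vandalism.angle.copiers"),
    (21, 25, "///ripe.decorated.risk"),
    (26, 30, "///quaking.public.ranted"),
    (31, 35, "///wrenching.directors.aliens"),
    (36, 40, "///icon.scrubbing.survey"),
    (41, 45, "///coil.initial.gourmet"),
    (46, 49, "///outer.simulator.harder"),
    (50, 53, "///salaried.waddled.clashes"),
    (54, 57, "///condiment.irrigate.exhales"),
    (58, 61, "///marathons.crispier.crystal"),
    (62, 65, "///talkative.term.universes"),
    (66, 69, "///feasted.residual.stitch"),
    (70, 73, "///rosier.landscape.minds"),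
    (74, 77, "///upgrading.revolting.belong") ]

-- the 'for start, end, code in w3w_ranges' loop with early return
def pvW3wScan (ranges : List (Int × Int × String)) (panel : Int) : Option String :=
  match ranges with
  | [] => none
  | (s, e, c) :: rest => if s ≤ panel ∧ panel ≤ e then some c else pvW3wScan rest panel

def get_what3words_code (panel_number : Option Int) : Option String :=
  match panel_number with
  | none => none
  | some panel => pvW3wScan pvW3wRanges panel

-- ===== PORT B =====
def pvW3wCodes : List String :=
  [ "///woke.fastening.rinses",
    "///timeless.craziest.tasteful",
    "///doll.caravans.begun",
    "///vandalism.angle.copiers",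
    "///ripe.decorated.risk",
    "///quaking.public.ranted",
    "///wrenching.directors.aliens",
    "///icon.scrubbing.survey",
    "///coil.initial.gourmet",
    "///outer.simulator.harder",
    "///salaried.waddled.clashes",
    "///condiment.irrigate.exhales",
    "///marathons.crispier.crystal",
    "///talkative.term.universes",
    "///feasted.residual.stitch",
    "///rosier.landscape.minds",
    "///upgrading.revolting.belong" ]

def get_what3words_code_alt (panel_number : Option Int) : Option String :=
  match panel_number with
  | none => none
  | some panel =>
    if 1 ≤ panel ∧ panel ≤ 45 then
      PySem.List.pyGet? pvW3wCodes (PySem.Int.floordiv (panel - 1) 5)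
    else if 46 ≤ panel ∧ panel ≤ 77 then
      PySem.List.pyGet? pvW3wCodes (9 + PySem.Int.floordiv (panel - 46) 4)
    else none

-- ===== PRECONDITION & SPEC =====
def Spec_get_what3words_code (panel_number : Option Int) (out : Option String) : Prop := out = get_what3words_code_alt panel_number
instance (panel_number : Option Int) (out : Option String) : Decidable (Spec_get_what3words_code panel_number out) := by unfold Spec_get_what3words_code; infer_instance

-- ===== CLAIM (what is proved, stated in full; the proofs are below) =====
def Claim_equal_get_what3words_code : Prop := ∀ (panel_number : Option Int), Dom_get_what3words_code panel_number → Spec_get_what3words_code panel_number (get_what3words_code panel_number)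

-- ===== LEMMAS AND PROOFS =====
theorem pv_scan_none (p : Int) (h : p < 1 ∨ 77 < p) : pvW3wScan pvW3wRanges p = none := by
  rw [pvW3wRanges]
  rw [pvW3wScan, if_neg (show ¬((1:Int) ≤ p ∧ p ≤ 5) by omega)]
  rw [pvW3wScan, if_neg (show ¬((6:Int) ≤ p ∧ p ≤ 10) by omega)]
  rw [pvW3wScan, if_neg (show ¬((11:Int) ≤ p ∧ p ≤ 15) by omega)]
  rw [pvW3wScan, if_neg (show ¬((16:Int) ≤ p ∧ p ≤ 20) by omega)]
  rw [pvW3wScan, if_neg (show ¬((21:Int) ≤ p ∧ p ≤ 25) by omega)]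
  rw [pvW3wScan, if_neg (show ¬((26:Int) ≤ p ∧ p ≤ 30) by omega)]
  rw [pvW3wScan, if_neg (show ¬((31:Int) ≤ p ∧ p ≤ 35) by omega)]
  rw [pvW3wScan, if_neg (show ¬((36:Int) ≤ p ∧ p ≤ 40) by omega)]
  rw [pvW3wScan, if_neg (show ¬((41:Int) ≤ p ∧ p ≤ 45) by omega)]
  rw [pvW3wScan, if_neg (show ¬((46:Int) ≤ p ∧ p ≤ 49) by omega)]
  rw [pvW3wScan, if_neg (show ¬((50:Int) ≤ p ∧ p ≤ 53) by omega)]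
  rw [pvW3wScan, if_neg (show ¬((54:Int) ≤ p ∧ p ≤ 57) by omega)]
  rw [pvW3wScan, if_neg (show ¬((58:Int) ≤ p ∧ p ≤ 61) by omega)]
  rw [pvW3wScan, if_neg (show ¬((62:Int) ≤ p ∧ p ≤ 65) by omega)]
  rw [pvW3wScan, if_neg (show ¬((66:Int) ≤ p ∧ p ≤ 69) by omega)]
  rw [pvW3wScan, if_neg (show ¬((70:Int) ≤ p ∧ p ≤ 73) by omega)]
  rw [pvW3wScan, if_neg (show ¬((74:Int) ≤ p ∧ p ≤ 77) by omega)]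
  rfl

theorem pv_out_of_range (p : Int) (h : p < 1 ∨ 77 < p) :
    get_what3words_code (some p) = get_what3words_code_alt (some p) := by
  simp only [get_what3words_code, get_what3words_code_alt]
  rw [pv_scan_none p h,
      if_neg (show ¬((1:Int) ≤ p ∧ p ≤ 45) by omega),
      if_neg (show ¬((46:Int) ≤ p ∧ p ≤ 77) by omega)]

theorem pv_in_range (p : Int) (h1 : 1 ≤ p) (h2 : p ≤ 77) :
    get_what3words_code (some p) = get_what3words_code_alt (some p) := by
  interval_cases p <;> decide

-- ===== VERDICT (by name: the statement is the Claim_ definition above) =====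
theorem get_what3words_code_spec : Claim_equal_get_what3words_code := by
  intro panel_number _
  unfold Spec_get_what3words_code
  match panel_number with
  | none => rfl
  | some p =>
    by_cases h : 1 ≤ p ∧ p ≤ 77
    · exact pv_in_range p h.1 h.2
    · exact pv_out_of_range p (by omega)
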